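-- pv_equiv track=rewrite | github.com/jdjodrey/advent-of-code | 2023/day13/day13_part2.py | has_smudged_reflection
-- ===== SOURCE A (Python) =====
-- def has_smudged_reflection(idx, pattern, offset=0, still_smudged=True):
--     prev_idx = idx - offset
--     next_idx = idx + offset + 1
--
--     if idx == 0 or prev_idx < 0 or next_idx == len(pattern):
--         return True
--
--     if pattern[prev_idx] == pattern[next_idx]:
--         return has_smudged_reflection(
--             idx, pattern, offset=offset + 1, still_smudged=still_smudged
--         )
--     elif still_smudged and differs_by_one_bit(pattern[prev_idx], pattern[next_idx]):
--         return has_smudged_reflection(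
--             idx, pattern, offset=offset + 1, still_smudged=False
--         )
--
--     return False
--
-- def differs_by_one_bit(pattern1, pattern2):
--     xor = int(pattern1, 2) ^ int(pattern2, 2)
--     return xor and ((xor & (xor - 1)) == 0)
-- ===== SOURCE B (Python) =====
-- def differs_by_one_bit(pattern1, pattern2):
--     xor = int(pattern1, 2) ^ int(pattern2, 2)
--     return xor and ((xor & (xor - 1)) == 0)
--
--
-- def has_smudged_reflection(idx, pattern, offset=0, still_smudged=True):
--     if idx == 0:
--         return True
--     # the walk compares the mirrored pairs (idx - k, idx + k + 1) for
--     # k = offset .. min(idx, len(pattern) - idx - 2); count the one-bit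
--     # smudges, reject a hard mismatch, and accept iff count <= budget
--     last = min(idx, len(pattern) - idx - 2)
--     smudges = 0
--     for k in range(offset, last + 1):
--         if pattern[idx - k] != pattern[idx + k + 1]:
--             if differs_by_one_bit(pattern[idx - k], pattern[idx + k + 1]):
--                 smudges += 1
--             else:
--                 return False
--     return smudges <= (1 if still_smudged else 0)
-- ===== Notes on version B (the rewrite author's own statement) =====
-- stated objective: alternative
-- what changed: Replaced the budgeted recursion by a closed-form pair range: B computes last = min(idx, len-idx-2) once, then a single counting loop over the mirrored pairs rejects any hard mismatch and accepts iff the number of one-bit-smudge pairs is at most the budget derived from still_smudged.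
-- outside the precondition, e.g. on has_smudged_reflection(1, ['x', 'x', 'x'], 0, True): A returns True, B returns True; on has_smudged_reflection(1, ['1', '0', '1', '1', '0', '1', '1', '1'], -5, True): A returns False, B returns False; on has_smudged_reflection(2, ['1', '', '', '1xy1y ', 'b1a99 ', 'a'], -1, False): A returns False, B raises ValueError
import Mathlib
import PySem

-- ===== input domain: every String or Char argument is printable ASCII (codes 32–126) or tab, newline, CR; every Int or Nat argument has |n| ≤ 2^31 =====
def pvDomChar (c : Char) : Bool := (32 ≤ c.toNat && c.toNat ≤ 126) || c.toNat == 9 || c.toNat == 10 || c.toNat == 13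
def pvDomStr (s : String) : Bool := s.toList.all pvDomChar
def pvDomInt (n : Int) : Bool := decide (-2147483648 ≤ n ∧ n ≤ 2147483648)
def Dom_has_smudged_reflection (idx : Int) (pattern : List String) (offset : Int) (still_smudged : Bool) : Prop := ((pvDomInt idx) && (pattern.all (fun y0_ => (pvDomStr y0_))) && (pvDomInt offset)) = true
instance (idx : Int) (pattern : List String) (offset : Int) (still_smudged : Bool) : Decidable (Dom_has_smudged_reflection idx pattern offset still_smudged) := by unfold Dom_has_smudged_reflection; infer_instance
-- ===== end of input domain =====

-- B replaces A's budgeted recursion by a closed-form pair range and a single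
-- counting loop (no hard mismatch allowed, smudge count ≤ budget); same cost.

-- ===== PORT A =====
-- int(s, 2): exact on Pre_'s rows, which are nonempty strings of '0'/'1' only
def pvParseBin (s : String) : Nat :=
  s.toList.foldl (fun a c => 2 * a + (if c == '1' then 1 else 0)) 0

def differs_by_one_bit (pattern1 pattern2 : String) : Bool :=
  let x := Nat.xor (pvParseBin pattern1) (pvParseBin pattern2)
  (!(x == 0)) && ((x &&& (x - 1)) == 0)

-- pattern[i] is ported as (pyGet? …).getD ""; under Pre_ every index that is
-- reached is in range, so the default is never taken on admitted inputs
def has_smudged_reflection (idx : Int) (pattern : List String) (offset : Int) (still_smudged : Bool) : Bool :=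
  let prev_idx := idx - offset
  let next_idx := idx + offset + 1
  if h : idx = 0 ∨ prev_idx < 0 ∨ next_idx = (pattern.length : Int) then true
  else if PySem.List.pyGet? pattern prev_idx = PySem.List.pyGet? pattern next_idx then
    has_smudged_reflection idx pattern (offset + 1) still_smudged
  else if still_smudged && differs_by_one_bit ((PySem.List.pyGet? pattern prev_idx).getD "") ((PySem.List.pyGet? pattern next_idx).getD "") then
    has_smudged_reflection idx pattern (offset + 1) false
  else false
termination_by (idx - offset + 1).toNat
decreasing_by all_goals (simp only [not_or] at h; omega)

-- ===== PORT B =====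
-- the for-loop of Source B over k ∈ range(offset, last+1), with early exit (none)
-- on a hard mismatch; returns the smudge count otherwise
def pvScanPairs (idx : Int) (pattern : List String) (ks : List Int) (smudges : Int) : Option Int :=
  match ks with
  | [] => some smudges
  | k :: rest =>
    let a := (PySem.List.pyGet? pattern (idx - k)).getD ""
    let b := (PySem.List.pyGet? pattern (idx + k + 1)).getD ""
    if a = b then pvScanPairs idx pattern rest smudges
    else if differs_by_one_bit a b then pvScanPairs idx pattern rest (smudges + 1)
    else none

def has_smudged_reflection_alt (idx : Int) (pattern : List String) (offset : Int) (still_smudged : Bool) : Bool :=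
  if idx = 0 then true
  else
    let last := min idx ((pattern.length : Int) - idx - 2)
    match pvScanPairs idx pattern (PySem.List.pyRange offset (last + 1)) 0 with
    | some m => decide (m ≤ (if still_smudged then 1 else 0))
    | none => false

-- ===== PRECONDITION & SPEC =====
def pvIsBinRow (s : String) : Bool := !s.toList.isEmpty && s.toList.all (fun c => c == '0' || c == '1')

-- Pre_ admits every immediate-exit input and otherwise requires the walk's
-- index window to stay in range and all rows to be plain binary literals:
-- outside this, int(row, 2) raises ValueError on a reached unequal pair or list
-- indexing raises/wraps — conservatively, inputs where A happens to return
-- (only equal pairs reached, or a negative next_idx wrapping around) are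
-- excluded too, since including them would need re-simulating the walk; on a
-- non-binary unequal pair reached with the budget already spent A short-circuits
-- to False while B's counting pass parses the pair and raises ValueError.
def Pre_has_smudged_reflection (idx : Int) (pattern : List String) (offset : Int) (still_smudged : Bool) : Prop :=
  idx = 0 ∨ idx - offset < 0 ∨ idx + offset + 1 = (pattern.length : Int) ∨
    (0 ≤ idx + offset + 1 ∧ idx + offset + 1 ≤ (pattern.length : Int) ∧
     idx - offset < (pattern.length : Int) ∧ ∀ r ∈ pattern, pvIsBinRow r = true)
instance (idx : Int) (pattern : List String) (offset : Int) (still_smudged : Bool) : Decidable (Pre_has_smudged_reflection idx pattern offset still_smudged) := by unfold Pre_has_smudged_reflection; infer_instance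

def pvWitness_has_smudged_reflection : Int × List String × Int × Bool := (0, ["01"], 0, true)

def Spec_has_smudged_reflection (idx : Int) (pattern : List String) (offset : Int) (still_smudged : Bool) (out : Bool) : Prop := out = has_smudged_reflection_alt idx pattern offset still_smudged
instance (idx : Int) (pattern : List String) (offset : Int) (still_smudged : Bool) (out : Bool) : Decidable (Spec_has_smudged_reflection idx pattern offset still_smudged out) := by unfold Spec_has_smudged_reflection; infer_instance

-- ===== CLAIM (what is proved, stated in full; the proofs are below) =====
def Claim_equal_has_smudged_reflection : Prop := ∀ (idx : Int) (pattern : List String) (offset : Int) (still_smudged : Bool), Dom_has_smudged_reflection idx pattern offset still_smudged → Pre_has_smudged_reflection idx pattern offset still_smudged → Spec_has_smudged_reflection idx pattern offset still_smudged (has_smudged_reflection idx pattern offset still_smudged)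

-- ===== LEMMAS AND PROOFS =====

lemma pvScanPairs_nil (idx : Int) (pattern : List String) (s : Int) :
    pvScanPairs idx pattern [] s = some s := rfl

lemma pvScanPairs_le (idx : Int) (pattern : List String) (ks : List Int) :
    ∀ (s m : Int), pvScanPairs idx pattern ks s = some m → s ≤ m := by
  induction ks with
  | nil =>
    intro s m h
    simp only [pvScanPairs, Option.some.injEq] at h
    omega
  | cons k rest ih =>
    intro s m h
    simp only [pvScanPairs] at h
    split_ifs at h with h1 h2
    · exact ih s m h
    · have := ih (s + 1) m h; omega

-- shifting the accumulator shifts the result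
lemma pvScanPairs_shift (idx : Int) (pattern : List String) (ks : List Int) :
    ∀ (s : Int), pvScanPairs idx pattern ks s = (pvScanPairs idx pattern ks 0).map (· + s) := by
  induction ks with
  | nil => intro s; simp [pvScanPairs]
  | cons k rest ih =>
    intro s
    simp only [pvScanPairs]
    split_ifs with h1 h2
    · exact ih s
    · rw [ih (s + 1), ih (0 + 1), Option.map_map]
      congr 1
      funext x
      simp only [Function.comp_apply]
      omega
    · rfl

-- B's match on an empty scan: both budgets accept a zero count
lemma pvMatchZero (s : Bool) :
    (match (some (0 : Int) : Option Int) with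
     | some m => decide (m ≤ (if s then 1 else 0))
     | none => false) = true := by
  cases s <;> rfl

-- the core equivalence: on the in-range binary part of Pre_, A's recursive
-- walk equals B's counted scan of the remaining pair range
lemma pvMain (fuel : Nat) : ∀ (idx : Int) (pattern : List String) (offset : Int) (s : Bool),
    (idx - offset + 1).toNat ≤ fuel →
    idx ≠ 0 →
    0 ≤ idx + offset + 1 →
    idx + offset + 1 ≤ (pattern.length : Int) →
    idx - offset < (pattern.length : Int) →
    has_smudged_reflection idx pattern offset s
      = (match pvScanPairs idx pattern
            (PySem.List.pyRange offset (min idx ((pattern.length : Int) - idx - 2) + 1)) 0 with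
         | some m => decide (m ≤ (if s then 1 else 0))
         | none => false) := by
  induction fuel with
  | zero =>
    intro idx pattern offset s hf h0 h1 h2 h3
    -- fuel 0 forces idx - offset < 0: A exits true and the pair range is empty
    rw [has_smudged_reflection, dif_pos (by omega : idx = 0 ∨ idx - offset < 0 ∨ idx + offset + 1 = (pattern.length : Int))]
    rw [PySem.List.pyRange_one_eq_nil (by omega), pvScanPairs_nil, pvMatchZero]
  | succ n ih =>
    intro idx pattern offset s hf h0 h1 h2 h3
    rw [has_smudged_reflection]
    by_cases hg : idx = 0 ∨ idx - offset < 0 ∨ idx + offset + 1 = (pattern.length : Int)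
    · rw [dif_pos hg]
      have hempty : min idx ((pattern.length : Int) - idx - 2) + 1 ≤ offset := by
        rcases hg with h | h | h <;> omega
      rw [PySem.List.pyRange_one_eq_nil hempty, pvScanPairs_nil, pvMatchZero]
    · rw [dif_neg hg]
      simp only [not_or] at hg
      obtain ⟨hg0, hg1, hg2⟩ := hg
      have hoff : offset < min idx ((pattern.length : Int) - idx - 2) + 1 := by omega
      rw [PySem.List.pyRange_one_cons hoff]
      simp only [pvScanPairs]
      have hprev : PySem.List.pyGet? pattern (idx - offset)
          = some (pattern[(idx - offset).toNat]'(by omega)) :=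
        PySem.List.pyGet?_eq_some_getElem pattern (by omega) (by omega)
      have hnext : PySem.List.pyGet? pattern (idx + offset + 1)
          = some (pattern[(idx + offset + 1).toNat]'(by omega)) :=
        PySem.List.pyGet?_eq_some_getElem pattern (by omega) (by omega)
      have hrec : ∀ (s' : Bool), has_smudged_reflection idx pattern (offset + 1) s'
          = (match pvScanPairs idx pattern
                (PySem.List.pyRange (offset + 1) (min idx ((pattern.length : Int) - idx - 2) + 1)) 0 with
             | some m => decide (m ≤ (if s' then 1 else 0))
             | none => false) := fun s' =>
        ih idx pattern (offset + 1) s' (by omega) h0 (by omega) (by omega) (by omega)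
      by_cases heq : PySem.List.pyGet? pattern (idx - offset) = PySem.List.pyGet? pattern (idx + offset + 1)
      · rw [if_pos heq]
        have heq' : (PySem.List.pyGet? pattern (idx - offset)).getD ""
            = (PySem.List.pyGet? pattern (idx + offset + 1)).getD "" := by rw [heq]
        rw [if_pos heq', hrec s]
      · rw [if_neg heq]
        have heq' : ¬ (PySem.List.pyGet? pattern (idx - offset)).getD ""
            = (PySem.List.pyGet? pattern (idx + offset + 1)).getD "" := by
          rw [hprev, hnext] at heq ⊢
          simpa using heq
        rw [if_neg heq']
        set a := (PySem.List.pyGet? pattern (idx - offset)).getD "" with ha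
        set b := (PySem.List.pyGet? pattern (idx + offset + 1)).getD "" with hb
        by_cases hd : differs_by_one_bit a b = true
        · rw [hd, pvScanPairs_shift]
          cases s with
          | true =>
            simp only [Bool.and_true, if_true]
            rw [hrec false]
            cases hx : pvScanPairs idx pattern
                (PySem.List.pyRange (offset + 1) (min idx ((pattern.length : Int) - idx - 2) + 1)) 0 with
            | none => simp
            | some m =>
              simp only [Option.map_some, Bool.false_eq_true, if_false]
              rw [decide_eq_decide]
              omega
          | false =>
            simp only [Bool.false_and, if_neg Bool.false_ne_true]
            cases hx : pvScanPairs idx pattern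
                (PySem.List.pyRange (offset + 1) (min idx ((pattern.length : Int) - idx - 2) + 1)) 0 with
            | none => simp
            | some m =>
              have hm : 0 ≤ m := pvScanPairs_le _ _ _ 0 m hx
              have hmle : ¬ (m + 1 ≤ (0 : Int)) := by omega
              simp [hmle]
        · simp only [Bool.not_eq_true] at hd
          rw [hd]
          simp

-- B returns true whenever the pair range is empty
lemma pvAltEmpty (idx : Int) (pattern : List String) (offset : Int) (s : Bool)
    (h : min idx ((pattern.length : Int) - idx - 2) + 1 ≤ offset) :
    has_smudged_reflection_alt idx pattern offset s = true := by
  simp only [has_smudged_reflection_alt]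
  by_cases h0 : idx = 0
  · rw [if_pos h0]
  · rw [if_neg h0, PySem.List.pyRange_one_eq_nil h, pvScanPairs_nil]
    cases s <;> rfl

-- B with the guard discharged is exactly the scan form used in pvMain
lemma pvAltNonzero (idx : Int) (pattern : List String) (offset : Int) (s : Bool)
    (h0 : idx ≠ 0) :
    has_smudged_reflection_alt idx pattern offset s
      = (match pvScanPairs idx pattern
            (PySem.List.pyRange offset (min idx ((pattern.length : Int) - idx - 2) + 1)) 0 with
         | some m => decide (m ≤ (if s then 1 else 0))
         | none => false) := by
  simp only [has_smudged_reflection_alt, if_neg h0]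

-- ===== VERDICT (by name: the statement is the Claim_ definition above) =====
theorem has_smudged_reflection_spec : Claim_equal_has_smudged_reflection := by
  intro idx pattern offset s _hdom hpre
  unfold Spec_has_smudged_reflection
  by_cases h0 : idx = 0
  · rw [has_smudged_reflection, dif_pos (Or.inl h0)]
    simp only [has_smudged_reflection_alt, if_pos h0]
  · by_cases hb : idx - offset < 0 ∨ idx + offset + 1 = (pattern.length : Int)
    · rw [has_smudged_reflection, dif_pos (Or.inr hb)]
      rw [pvAltEmpty idx pattern offset s (by rcases hb with h | h <;> omega)]
    · rcases hpre with h | h | h | ⟨hp1, hp2, hp3, _⟩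
      · exact absurd h h0
      · exact absurd (Or.inl h) hb
      · exact absurd (Or.inr h) hb
      · rw [pvMain (idx - offset + 1).toNat idx pattern offset s le_rfl h0 hp1 hp2 hp3,
           pvAltNonzero idx pattern offset s h0]
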